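-- pv_equiv track=rewrite | github.com/mae05051/CodingTestStudy | 2주차_Stack,Queue/고득점 kit - 기능개발 (2단계).py | solution
-- ===== SOURCE A (Python) =====
-- import math
--
-- def solution(progresses, speeds):
--     end_day=[]
--     for i,j in zip(progresses,speeds):#미리 걸린 날 list만들기
--         end_day.append(math.ceil((100-i)/j))
--     cnt = 0
--     answer = []
--     for i in range(1,len(progresses)):
--         if end_day[i] > end_day[cnt]:
--             answer.append(i - cnt) #한번에 배포되는 수
--             cnt = i
--     answer.append(len(progresses)-cnt)
--     return answer
-- ===== SOURCE B (Python) =====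
-- def solution(progresses, speeds):
--     # peel off one leading batch at a time from the list of finish days
--     days = [-((p - 100) // s) for p, s in zip(progresses, speeds)]
--     answer = []
--     while days:
--         head, rest = days[0], days[1:]
--         k = 0
--         while k < len(rest) and rest[k] <= head:
--             k += 1
--         answer.append(1 + k)
--         days = rest[k:]
--     return answer
-- ===== Notes on version B (the rewrite author's own statement) =====
-- stated objective: alternative
-- what changed: B repeatedly peels the leading batch off the finish-day list (count the leading run of days <= the head, emit its size, slice the remainder away) instead of A's single index scan with an anchor index cnt and an unconditional trailing append; finish days use exact integer ceiling division instead of float math.ceil.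
-- intended difference: On inputs where zip drops tasks (empty progresses, or fewer speeds than progresses, which inside Pre_ means a single progress with no speed) A's unconditional final append still reports a batch counting the untracked tasks ([0] resp. [1]); B returns the batches of the tasks actually paired with a speed, i.e. [], the intended answer for 'no tracked deployments'. — e.g. on solution([], []): A returns [0], B returns []
import Mathlib
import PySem

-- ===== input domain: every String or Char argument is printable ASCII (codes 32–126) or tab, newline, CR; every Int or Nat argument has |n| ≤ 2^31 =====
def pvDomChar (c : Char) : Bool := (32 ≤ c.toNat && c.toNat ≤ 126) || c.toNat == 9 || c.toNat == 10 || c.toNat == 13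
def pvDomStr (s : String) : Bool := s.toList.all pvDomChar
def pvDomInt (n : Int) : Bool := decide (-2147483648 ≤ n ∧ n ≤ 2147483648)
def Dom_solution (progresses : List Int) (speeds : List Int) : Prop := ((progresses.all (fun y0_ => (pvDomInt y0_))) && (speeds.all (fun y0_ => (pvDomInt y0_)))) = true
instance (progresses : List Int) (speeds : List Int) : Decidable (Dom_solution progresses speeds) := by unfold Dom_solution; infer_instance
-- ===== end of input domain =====

-- B peels one leading batch at a time off the finish-day list (count the run of days ≤ the head,
-- emit its size, slice it away) instead of A's anchor-index scan with a trailing append;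
-- objective: alternative decomposition, same cost.

-- ===== PORT A =====
def solution (progresses : List Int) (speeds : List Int) : List Int :=
  -- math.ceil((100 - i) / j) is ported as the exact integer ceiling -((-(100 - i)) // j): on Dom
  -- (|operands| ≤ 2^31) the correctly rounded double division can never cross an integer upward,
  -- so float ceil = exact ceil there (Python raises ZeroDivisionError for j = 0; excluded by Pre_).
  let end_day := (progresses.zip speeds).foldl
    (fun acc ij => acc ++ [-(PySem.Int.floordiv (-(100 - ij.1)) ij.2)]) []
  let st := (PySem.List.pyRange 1 (progresses.length : Int) 1).foldl
    (fun (st : Int × List Int) i =>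
      -- end_day[i] / end_day[cnt]: in range under Pre_ (Python raises IndexError out of range)
      if PySem.List.pyGetD end_day i 0 > PySem.List.pyGetD end_day st.1 0 then
        (i, st.2 ++ [i - st.1])
      else st)
    ((0 : Int), ([] : List Int))
  st.2 ++ [(progresses.length : Int) - st.1]

-- ===== PORT B =====
-- inner while loop of Source B: how many leading elements of the remainder are ≤ head
def countLe (h : Int) : List Int → Nat
  | [] => 0
  | d :: t => if d ≤ h then countLe h t + 1 else 0

-- outer while loop of Source B, state (answer, days): peel one batch per iteration; the fuel counter
-- only makes the loop structural (each iteration removes ≥ 1 day, so fuel = |days| is never exhausted)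
def solutionB_go : Nat → List Int → List Int → List Int
  | _, ans, [] => ans
  | 0, ans, _ => ans
  | fuel + 1, ans, h :: rest =>
      solutionB_go fuel (ans ++ [((1 + countLe h rest : Nat) : Int)]) (rest.drop (countLe h rest))

def solution_alt (progresses : List Int) (speeds : List Int) : List Int :=
  let days := (progresses.zip speeds).map (fun ps => -(PySem.Int.floordiv (ps.1 - 100) ps.2))
  solutionB_go days.length [] days

-- ===== PRECONDITION & SPEC =====
-- Pre_ excludes exactly where Python A raises: a zero speed among the zipped pairs
-- (ZeroDivisionError) and fewer speeds than progresses with ≥ 2 progresses (IndexError on end_day[i]).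
def Pre_solution (progresses : List Int) (speeds : List Int) : Prop :=
  (progresses.length ≤ 1 ∨ progresses.length ≤ speeds.length) ∧
    ∀ s ∈ speeds.take progresses.length, s ≠ 0

instance (progresses : List Int) (speeds : List Int) : Decidable (Pre_solution progresses speeds) := by
  unfold Pre_solution; infer_instance

def pvWitness_solution : List Int × List Int := ([93, 30, 55], [1, 30, 5])

-- On inputs where zip drops tasks (empty progresses, or fewer speeds than progresses — inside Pre_
-- that is exactly a single progress with no speed) A's unconditional final append still reports a
-- batch counting the untracked tasks ([0] resp. [1]); B returns the batches of the tasks actually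
-- paired with a speed, i.e. [], the intended answer.
def D_solution (progresses : List Int) (speeds : List Int) : Prop :=
  progresses = [] ∨ speeds.length < progresses.length

instance (progresses : List Int) (speeds : List Int) : Decidable (D_solution progresses speeds) := by
  unfold D_solution; infer_instance

def Spec_solution (progresses : List Int) (speeds : List Int) (out : List Int) : Prop := ¬ D_solution progresses speeds → out = solution_alt progresses speeds
instance (progresses : List Int) (speeds : List Int) (out : List Int) : Decidable (Spec_solution progresses speeds out) := by unfold Spec_solution; infer_instance

def pvDiffWitness_solution : List Int × List Int := ([], [])
def pvDiffWitnessOut_solution : (List Int) × (List Int) := ([0], [])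

-- ===== CLAIM (what is proved, stated in full; the proofs are below) =====
def Claim_unchanged_solution : Prop := ∀ (progresses : List Int) (speeds : List Int), Dom_solution progresses speeds → Pre_solution progresses speeds → Spec_solution progresses speeds (solution progresses speeds)
def Claim_changed_solution : Prop := Dom_solution (pvDiffWitness_solution.1) (pvDiffWitness_solution.2) ∧ Pre_solution (pvDiffWitness_solution.1) (pvDiffWitness_solution.2) ∧ D_solution (pvDiffWitness_solution.1) (pvDiffWitness_solution.2) ∧ solution (pvDiffWitness_solution.1) (pvDiffWitness_solution.2) = pvDiffWitnessOut_solution.1 ∧ solution_alt (pvDiffWitness_solution.1) (pvDiffWitness_solution.2) = pvDiffWitnessOut_solution.2 ∧ pvDiffWitnessOut_solution.1 ≠ pvDiffWitnessOut_solution.2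
def Claim_exact_solution : Prop := ∀ (progresses : List Int) (speeds : List Int), Dom_solution progresses speeds → Pre_solution progresses speeds → D_solution progresses speeds → solution progresses speeds ≠ solution_alt progresses speeds

-- ===== LEMMAS AND PROOFS =====

-- common reference: batch sizes, given anchor value top, batch start index, current index, total n
def refgo (top : Int) (start i n : Nat) : List Int → List Int
  | [] => [(n : Int) - (start : Int)]
  | d :: rest =>
      if d > top then ((i : Int) - (start : Int)) :: refgo d i (i + 1) n rest
      else refgo top start (i + 1) n rest

-- A's scan loop computes refgo
theorem lemA (rest : List Int) : ∀ (pre : List Int) (cnt : Nat) (ans : List Int),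
    cnt < pre.length →
    ((PySem.List.pyRange (pre.length : Int) (((pre ++ rest).length : Nat) : Int) 1).foldl
       (fun (st : Int × List Int) i =>
         if PySem.List.pyGetD (pre ++ rest) i 0 > PySem.List.pyGetD (pre ++ rest) st.1 0 then
           (i, st.2 ++ [i - st.1])
         else st)
       ((cnt : Int), ans)).2 ++
      [(((pre ++ rest).length : Nat) : Int) -
        ((PySem.List.pyRange (pre.length : Int) (((pre ++ rest).length : Nat) : Int) 1).foldl
          (fun (st : Int × List Int) i =>
            if PySem.List.pyGetD (pre ++ rest) i 0 > PySem.List.pyGetD (pre ++ rest) st.1 0 then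
              (i, st.2 ++ [i - st.1])
            else st)
          ((cnt : Int), ans)).1]
    = ans ++ refgo ((pre ++ rest).getD cnt 0) cnt pre.length (pre ++ rest).length rest := by
  induction rest with
  | nil =>
    intro pre cnt ans h
    have hle : (((pre ++ ([] : List Int)).length : Nat) : Int) ≤ (pre.length : Int) := by simp
    rw [PySem.List.pyRange_one_eq_nil hle]
    simp [refgo]
  | cons d rest ih =>
    intro pre cnt ans h
    have hlen : (pre.length : Int) < (((pre ++ d :: rest).length : Nat) : Int) := by
      simp only [List.length_append, List.length_cons]
      omega
    rw [PySem.List.pyRange_one_cons hlen]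
    have hed_i : PySem.List.pyGetD (pre ++ d :: rest) (pre.length : Int) 0 = d := by
      rw [PySem.List.pyGetD_natCast]
      simp [List.getD_eq_getElem?_getD]
    have hed_c : PySem.List.pyGetD (pre ++ d :: rest) (cnt : Int) 0 = (pre ++ d :: rest).getD cnt 0 := by
      rw [PySem.List.pyGetD_natCast]
    have hassoc : pre ++ d :: rest = (pre ++ [d]) ++ rest := by simp
    have hcast1 : ((pre.length : Int) + 1) = (((pre ++ [d]).length : Nat) : Int) := by
      simp
    by_cases hbr : d > (pre ++ d :: rest).getD cnt 0
    · simp only [List.foldl_cons, hed_i, hed_c, if_pos hbr]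
      have := ih (pre ++ [d]) pre.length (ans ++ [(pre.length : Int) - (cnt : Int)])
        (by simp)
      have hd : ((pre ++ [d]) ++ rest).getD pre.length 0 = d := by
        simp [List.getD_eq_getElem?_getD]
      have hgd : ((pre ++ [d]) ++ rest).getD cnt 0 = (pre ++ d :: rest).getD cnt 0 := by rw [← hassoc]
      rw [hassoc, hcast1, this, hd, hgd]
      simp only [refgo]
      rw [if_pos hbr]
      simp [List.append_assoc]
    · simp only [List.foldl_cons, hed_i, hed_c, if_neg hbr]
      have := ih (pre ++ [d]) cnt ans (by simp; omega)
      have hgd : ((pre ++ [d]) ++ rest).getD cnt 0 = (pre ++ d :: rest).getD cnt 0 := by rw [← hassoc]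
      rw [hassoc, hcast1, this, hgd]
      simp only [refgo]
      rw [if_neg hbr]
      simp [List.append_assoc]

theorem countLe_le (h : Int) (l : List Int) : countLe h l ≤ l.length := by
  induction l with
  | nil => simp [countLe]
  | cons d t ih => simp only [countLe, List.length_cons]; split <;> omega

-- if the whole list is one batch, refgo emits the single trailing size
theorem refgo_all (l : List Int) : ∀ (h : Int) (s i n : Nat),
    n = i + l.length → l.drop (countLe h l) = [] →
    refgo h s i n l = [(n : Int) - (s : Int)] := by
  induction l with
  | nil => intro h s i n _ _; simp [refgo]
  | cons d t ih =>
    intro h s i n hn hdrop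
    by_cases hle : d ≤ h
    · have hng : ¬ d > h := by omega
      simp only [refgo, if_neg hng]
      apply ih h s (i + 1) n (by simp at hn ⊢; omega)
      simpa [countLe, hle] using hdrop
    · exfalso
      simp [countLe, hle] at hdrop

-- if a break follows the leading batch, refgo emits its size and restarts at the break
theorem refgo_break (l : List Int) : ∀ (h : Int) (s i n : Nat) (d : Int) (rest : List Int),
    n = i + l.length → l.drop (countLe h l) = d :: rest →
    refgo h s i n l =
      (((i + countLe h l : Nat) : Int) - (s : Int)) ::
        refgo d (i + countLe h l) (i + countLe h l + 1) n rest := by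
  induction l with
  | nil => intro h s i n d rest _ hdrop; simp [countLe] at hdrop
  | cons a t ih =>
    intro h s i n d rest hn hdrop
    by_cases hle : a ≤ h
    · have hng : ¬ a > h := by omega
      have hk : countLe h (a :: t) = countLe h t + 1 := by simp [countLe, hle]
      rw [hk] at hdrop ⊢
      rw [List.drop_succ_cons] at hdrop
      have h1 : i + (countLe h t + 1) = (i + 1) + countLe h t := by omega
      rw [h1]
      simp only [refgo, if_neg hng]
      exact ih h s (i + 1) n d rest (by simp at hn ⊢; omega) hdrop
    · have hbr : a > h := by omega
      have hk : countLe h (a :: t) = 0 := by simp [countLe, hle]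
      rw [hk] at hdrop ⊢
      rw [List.drop_zero] at hdrop
      injection hdrop with h1 h2
      subst h1; subst h2
      simp only [refgo, if_pos hbr, Nat.add_zero]

-- B's outer loop computes refgo (fuel bound: one batch per unit of fuel)
theorem loop_refgo (m : Nat) : ∀ (l : List Int), l.length ≤ m →
    ∀ (h : Int) (s : Nat) (ans : List Int),
    solutionB_go (m + 1) ans (h :: l) = ans ++ refgo h s (s + 1) (s + 1 + l.length) l := by
  induction m with
  | zero =>
    intro l hl h s ans
    have hnil : l = [] := List.length_eq_zero_iff.mp (Nat.le_zero.mp hl)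
    subst hnil
    simp [solutionB_go, countLe, refgo]
  | succ m ih =>
    intro l hl h s ans
    rw [show solutionB_go (m + 1 + 1) ans (h :: l)
        = solutionB_go (m + 1) (ans ++ [((1 + countLe h l : Nat) : Int)]) (l.drop (countLe h l))
      from rfl]
    cases hdrop : l.drop (countLe h l) with
    | nil =>
      rw [show solutionB_go (m + 1) (ans ++ [((1 + countLe h l : Nat) : Int)]) []
          = ans ++ [((1 + countLe h l : Nat) : Int)] from rfl]
      rw [refgo_all l h s (s + 1) (s + 1 + l.length) rfl hdrop]
      have hk : countLe h l = l.length := by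
        have := countLe_le h l
        have := List.drop_eq_nil_iff.mp hdrop
        omega
      rw [hk]
      have : (((1 + l.length : Nat) : Int)) = ((s + 1 + l.length : Nat) : Int) - (s : Nat) := by
        push_cast; omega
      rw [this]
    | cons d rest =>
      rw [refgo_break l h s (s + 1) (s + 1 + l.length) d rest rfl hdrop]
      have hklen : countLe h l + (1 + rest.length) = l.length := by
        have h1 := countLe_le h l
        have h2 : (l.drop (countLe h l)).length = l.length - countLe h l := by
          simp
        rw [hdrop] at h2
        simp at h2
        omega
      have hrest : rest.length ≤ m := by omega
      have hn : s + 1 + l.length = (s + 1 + countLe h l) + 1 + rest.length := by omega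
      rw [hn]
      rw [ih rest hrest d (s + 1 + countLe h l) (ans ++ [((1 + countLe h l : Nat) : Int)])]
      have hc : (((1 + countLe h l : Nat) : Int)) = ((s + 1 + countLe h l : Nat) : Int) - (s : Nat) := by
        push_cast; omega
      rw [hc]
      simp [List.append_assoc]

-- ===== VERDICT (by name: the statement is the Claim_ definition above) =====
theorem solution_spec : Claim_unchanged_solution := by
  intro P S _hdom hpre
  unfold Spec_solution
  intro hD
  unfold D_solution at hD
  push Not at hD
  obtain ⟨hne, hlen⟩ := hD
  cases P with
  | nil => exact absurd rfl hne
  | cons p P' =>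
    cases S with
    | nil => simp at hlen
    | cons s S' =>
      simp only [solution, solution_alt]
      have hlen' : P'.length ≤ S'.length := by simpa using hlen
      set e : Int := -(PySem.Int.floordiv (p - 100) s) with he
      set es : List Int := (P'.zip S').map (fun ij => -(PySem.Int.floordiv (ij.1 - 100) ij.2)) with hes
      have hedlen : es.length = P'.length := by
        simp only [hes, List.length_map, List.length_zip]
        omega
      -- A's finish-day list
      have hED : (((p :: P').zip (s :: S')).foldl
          (fun acc ij => acc ++ [-(PySem.Int.floordiv (-(100 - ij.1)) ij.2)]) ([] : List Int))
          = e :: es := by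
        rw [PySem.List.foldl_append_singleton_eq_map]
        simp only [List.nil_append, List.zip_cons_cons, List.map_cons]
        rw [he, hes]
        simp [neg_sub]
      rw [hED]
      -- B's finish-day list
      have hdays : ((p :: P').zip (s :: S')).map
          (fun ps => -(PySem.Int.floordiv (ps.1 - 100) ps.2)) = e :: es := by
        simp only [List.zip_cons_cons, List.map_cons]
        rfl
      rw [hdays]
      have hcastn : (((p :: P').length : Nat) : Int) = (((es.length + 1 : Nat)) : Int) := by
        simp [hedlen]
      rw [hcastn]
      refine Eq.trans (b := refgo e 0 1 (es.length + 1) es) ?_ ?_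
      · have hl : es.length + 1 = ([e] ++ es).length := by simp
        rw [hl]
        exact lemA es [e] 0 [] (by simp)
      · refine Eq.symm ?_
        have h01 : (0 : Nat) + 1 + es.length = es.length + 1 := by omega
        have := loop_refgo es.length es le_rfl e 0 []
        rw [h01] at this
        rw [show (e :: es).length = es.length + 1 from rfl]
        simpa using this

theorem solution_changed : Claim_changed_solution := by unfold Claim_changed_solution; decide

theorem solution_tight : Claim_exact_solution := by
  intro P S _hdom hpre hD
  cases P with
  | nil =>
    have hA : solution [] S = [0] := by
      simp only [solution]
      rw [List.zip_nil_left]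
      rw [show ((([] : List Int).length : Nat) : Int) = 0 from rfl,
        PySem.List.pyRange_one_eq_nil (by norm_num)]
      simp
    have hB : solution_alt [] S = [] := by
      simp only [solution_alt]
      rw [List.zip_nil_left, List.map_nil]
      rfl
    simp [hA, hB]
  | cons p P' =>
    have hS : S.length ≤ P'.length := by
      rcases hD with h | h
      · exact absurd h (by simp)
      · simp only [List.length_cons] at h; omega
    have hP'0 : P'.length = 0 := by
      rcases hpre.1 with h | h
      · simp only [List.length_cons] at h; omega
      · simp only [List.length_cons] at h; omega
    have hP' : P' = [] := List.length_eq_zero_iff.mp hP'0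
    subst hP'
    have hSnil : S = [] := by simpa using hS
    subst hSnil
    have hA : solution [p] [] = [1] := by
      simp only [solution]
      rw [List.zip_nil_right]
      rw [show ((([p] : List Int).length : Nat) : Int) = 1 from rfl,
        PySem.List.pyRange_one_eq_nil (by norm_num)]
      simp
    have hB : solution_alt [p] [] = [] := by
      simp only [solution_alt]
      rw [List.zip_nil_right, List.map_nil]
      rfl
    simp [hA, hB]
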